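-- pv_equiv track=rewrite | github.com/tabakuqemal903-prog/Arcaea_slicer | src/arcaea_slicer/aff.py | _extract_header_and_body
-- ===== SOURCE A (Python) =====
-- def _extract_header_and_body(aff_text: str) -> tuple[list[str], list[str]]:
--     lines = aff_text.replace("\r\n", "\n").replace("\r", "\n").split("\n")
--     header: list[str] = []
--     body: list[str] = []
--     sep_found = False
--     for line in lines:
--         if not sep_found and line.strip() == "-":
--             sep_found = True
--             header.append("-")
--             continue
--         if not sep_found:
--             header.append(line)
--         else:
--             body.append(line)
--     if not sep_found:
--         # No separator; treat all as body but keep empty header with '-'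
--         return ["-"], lines
--     return header, body
-- ===== SOURCE B (Python) =====
-- def _extract_header_and_body(aff_text: str) -> tuple[list[str], list[str]]:
--     lines = aff_text.replace("\r\n", "\n").replace("\r", "\n").split("\n")
--     idx = next((i for i, l in enumerate(lines) if l.strip() == "-"), None)
--     if idx is None:
--         return ["-"], lines
--     return lines[:idx] + ["-"], lines[idx + 1:]
-- ===== Notes on version B (the rewrite author's own statement) =====
-- stated objective: simpler
-- what changed: Replaces the flag-driven per-line accumulation loop with locate-the-separator-index then slice (lines[:idx]+['-'], lines[idx+1:]).
import Mathlib
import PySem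

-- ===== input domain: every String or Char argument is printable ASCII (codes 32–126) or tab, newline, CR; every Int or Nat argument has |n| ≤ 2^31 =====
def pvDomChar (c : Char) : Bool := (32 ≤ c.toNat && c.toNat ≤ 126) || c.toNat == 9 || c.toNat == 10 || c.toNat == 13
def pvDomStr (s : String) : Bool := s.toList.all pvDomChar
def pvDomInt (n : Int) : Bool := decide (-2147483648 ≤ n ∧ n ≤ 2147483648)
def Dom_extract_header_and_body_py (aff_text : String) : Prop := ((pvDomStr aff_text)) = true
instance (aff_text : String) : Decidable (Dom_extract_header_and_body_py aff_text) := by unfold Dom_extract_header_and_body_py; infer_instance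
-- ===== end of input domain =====

-- B replaces A's flag-driven accumulation loop by locate-the-separator then slice; objective: simpler.

-- ===== PORT A =====
-- the for-loop over lines with state (header, body, sep_found)
def extract_header_and_body_py (aff_text : String) : List String × List String :=
  -- s.split("\n"): split? returns some since the separator is nonempty; getD never fires
  let lines := (PySem.Str.split?
    (PySem.Str.replace (PySem.Str.replace aff_text "\r\n" "\n") "\r" "\n") "\n").getD []
  let r := lines.foldl (fun (st : List String × List String × Bool) line =>
    if !st.2.2 && (PySem.Str.strip line == "-") then (st.1 ++ ["-"], st.2.1, true)
    else if !st.2.2 then (st.1 ++ [line], st.2.1, st.2.2)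
    else (st.1, st.2.1 ++ [line], st.2.2)) ([], [], false)
  if r.2.2 = false then (["-"], lines) else (r.1, r.2.1)

-- ===== PORT B =====
-- locate the first separator line, then slice; lines[:i] / lines[i+1:] with i ≥ 0 are take/drop (exact for nonnegative in-range slice bounds)
def extract_header_and_body_py_alt (aff_text : String) : List String × List String :=
  -- s.split("\n"): split? returns some since the separator is nonempty; getD never fires
  let lines := (PySem.Str.split?
    (PySem.Str.replace (PySem.Str.replace aff_text "\r\n" "\n") "\r" "\n") "\n").getD []
  match lines.findIdx? (fun l => PySem.Str.strip l == "-") with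
  | none => (["-"], lines)
  | some i => (lines.take i ++ ["-"], lines.drop (i + 1))

-- ===== PRECONDITION & SPEC =====
def Spec_extract_header_and_body_py (aff_text : String) (out : List String × List String) : Prop := out = extract_header_and_body_py_alt aff_text
instance (aff_text : String) (out : List String × List String) : Decidable (Spec_extract_header_and_body_py aff_text out) := by unfold Spec_extract_header_and_body_py; infer_instance

-- ===== CLAIM (what is proved, stated in full; the proofs are below) =====
def Claim_equal_extract_header_and_body_py : Prop := ∀ (aff_text : String), Dom_extract_header_and_body_py aff_text → Spec_extract_header_and_body_py aff_text (extract_header_and_body_py aff_text)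

-- ===== LEMMAS AND PROOFS =====

-- the loop body of A's port, as a named function for the lemmas
def pvStep (st : List String × List String × Bool) (line : String) : List String × List String × Bool :=
  if !st.2.2 && (PySem.Str.strip line == "-") then (st.1 ++ ["-"], st.2.1, true)
  else if !st.2.2 then (st.1 ++ [line], st.2.1, st.2.2)
  else (st.1, st.2.1 ++ [line], st.2.2)

-- once sep_found is true the loop only appends to body
theorem pvFoldl_true (lines : List String) (h b : List String) :
    lines.foldl pvStep (h, b, true) = (h, b ++ lines, true) := by
  induction lines generalizing b with
  | nil => simp
  | cons l ls ih => simp [pvStep, ih]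

-- characterisation of the whole loop via the first separator index
theorem pvFoldl_false (lines : List String) (h b : List String) :
    lines.foldl pvStep (h, b, false) =
      match lines.findIdx? (fun l => PySem.Str.strip l == "-") with
      | none => (h ++ lines, b, false)
      | some i => (h ++ lines.take i ++ ["-"], b ++ lines.drop (i + 1), true) := by
  induction lines generalizing h with
  | nil => simp
  | cons l ls ih =>
    by_cases hp : (PySem.Str.strip l == "-") = true
    · simp [List.findIdx?_cons, hp, pvStep, pvFoldl_true]
    · simp only [List.foldl_cons, pvStep, Bool.not_false, hp, Bool.and_false,
        if_true, List.findIdx?_cons]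
      rw [if_neg (by simp), ih (h ++ [l])]
      cases hfi : ls.findIdx? (fun l => PySem.Str.strip l == "-") with
      | none => simp
      | some i => simp

-- ===== VERDICT (by name: the statement is the Claim_ definition above) =====
theorem extract_header_and_body_py_spec : Claim_equal_extract_header_and_body_py := by
  intro aff_text _
  show _ = _
  unfold extract_header_and_body_py extract_header_and_body_py_alt
  have : ∀ (st : List String × List String × Bool) (line : String),
      (if !st.2.2 && (PySem.Str.strip line == "-") then (st.1 ++ ["-"], st.2.1, true)
       else if !st.2.2 then (st.1 ++ [line], st.2.1, st.2.2)
       else (st.1, st.2.1 ++ [line], st.2.2)) = pvStep st line := fun _ _ => rfl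
  simp only [this]
  rw [pvFoldl_false]
  cases hfi : ((PySem.Str.split?
      (PySem.Str.replace (PySem.Str.replace aff_text "\r\n" "\n") "\r" "\n") "\n").getD []).findIdx?
      (fun l => PySem.Str.strip l == "-") <;> simp
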